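-- pv_equiv track=rewrite | github.com/jiangpw41/LLMInferenceServer | offline/local/predict.py | get_interval_pair
-- ===== SOURCE A (Python) =====
-- def get_interval_pair( prompt, part_id, part_num ):
--     total_len = len(prompt)
--     part_len = total_len // part_num
--     index_list = []
--     for i in range(part_num):
--         index_list.append( part_len*i )
--     index_list.append( total_len)
--     # 获取所有分部的range左右区间，并根据part_id获取自身要处理的数据集的左右区间
--     split_list = []
--     for i in range(part_num):
--         index_pair = []
--         left = index_list[i]
--         right = index_list[i+1]
--         split_list.append((left, right))
--     index_pair = split_list[part_id]
--     return index_pair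
-- ===== SOURCE B (Python) =====
-- def get_interval_pair(prompt, part_id, part_num):
--     total_len = len(prompt)
--     part_len = total_len // part_num
--     i = range(part_num)[part_id]
--     if i == part_num - 1:
--         return (part_len * i, total_len)
--     return (part_len * i, part_len * (i + 1))
-- ===== Notes on version B (the rewrite author's own statement) =====
-- stated objective: simpler
-- what changed: B looks up the partition index with range(part_num)[part_id] and computes the single (left, right) pair in closed form, instead of materialising index_list and split_list and indexing into them; Pre_ excludes only the inputs on which A raises (part_num <= 0, or part_id outside the list-index range).
import Mathlib
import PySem

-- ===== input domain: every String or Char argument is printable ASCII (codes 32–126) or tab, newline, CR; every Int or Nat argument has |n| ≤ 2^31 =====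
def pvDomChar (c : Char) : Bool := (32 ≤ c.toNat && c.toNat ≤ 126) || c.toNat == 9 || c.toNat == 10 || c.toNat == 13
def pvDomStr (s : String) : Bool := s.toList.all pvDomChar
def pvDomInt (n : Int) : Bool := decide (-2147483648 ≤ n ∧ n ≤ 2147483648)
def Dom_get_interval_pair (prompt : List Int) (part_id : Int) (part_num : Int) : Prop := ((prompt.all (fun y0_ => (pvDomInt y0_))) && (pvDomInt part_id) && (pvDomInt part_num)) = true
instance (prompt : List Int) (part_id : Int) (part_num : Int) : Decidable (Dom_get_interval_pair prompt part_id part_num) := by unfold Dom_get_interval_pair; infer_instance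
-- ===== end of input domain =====

-- B computes the one requested pair in closed form from the partition index
-- (looked up via range(part_num)[part_id]) instead of building index_list and
-- split_list and indexing into them: simpler, no intermediate lists.

-- ===== PORT A =====
def get_interval_pair (prompt : List Int) (part_id : Int) (part_num : Int) : Int × Int :=
  let total_len : Int := prompt.length
  let part_len : Int := PySem.Int.floordiv total_len part_num
  let index_list : List Int :=
    (PySem.List.pyRange 0 part_num 1).foldl (fun acc i => acc ++ [part_len * i]) []
  let index_list := index_list ++ [total_len]
  let split_list : List (Int × Int) :=
    (PySem.List.pyRange 0 part_num 1).foldl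
      (fun acc i =>
        acc ++ [(PySem.List.pyGetD index_list i (0 : Int),
                 PySem.List.pyGetD index_list (i + 1) (0 : Int))]) []
  PySem.List.pyGetD split_list part_id ((0 : Int), (0 : Int))

-- ===== PORT B =====
def get_interval_pair_alt (prompt : List Int) (part_id : Int) (part_num : Int) : Int × Int :=
  let total_len : Int := prompt.length
  let part_len : Int := PySem.Int.floordiv total_len part_num
  let i : Int := PySem.List.pyGetD (PySem.List.pyRange 0 part_num 1) part_id 0
  if i = part_num - 1 then (part_len * i, total_len)
  else (part_len * i, part_len * (i + 1))

-- ===== PRECONDITION & SPEC =====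
-- A raises ZeroDivisionError for part_num = 0 and IndexError unless -part_num ≤ part_id < part_num
-- (in particular for every part_num < 0, whose split_list is empty); Pre_ excludes exactly those
-- raising inputs (B raises the same exceptions there).
def Pre_get_interval_pair (prompt : List Int) (part_id : Int) (part_num : Int) : Prop :=
  0 < part_num ∧ -part_num ≤ part_id ∧ part_id < part_num
instance (prompt : List Int) (part_id : Int) (part_num : Int) : Decidable (Pre_get_interval_pair prompt part_id part_num) := by unfold Pre_get_interval_pair; infer_instance
def pvWitness_get_interval_pair : List Int × Int × Int := ([3, 1, 4, 1, 5], -2, 3)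

def Spec_get_interval_pair (prompt : List Int) (part_id : Int) (part_num : Int) (out : Int × Int) : Prop := out = get_interval_pair_alt prompt part_id part_num
instance (prompt : List Int) (part_id : Int) (part_num : Int) (out : Int × Int) : Decidable (Spec_get_interval_pair prompt part_id part_num out) := by unfold Spec_get_interval_pair; infer_instance

-- ===== CLAIM =====
def Claim_equal_get_interval_pair : Prop := ∀ (prompt : List Int) (part_id : Int) (part_num : Int), Dom_get_interval_pair prompt part_id part_num → Pre_get_interval_pair prompt part_id part_num → Spec_get_interval_pair prompt part_id part_num (get_interval_pair prompt part_id part_num)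

-- ===== LEMMAS AND PROOFS =====

-- Python indexing into a list of length n.toNat with -n ≤ j < n hits slot (mod j n).
theorem pv_pyGetD_wrap {α : Type} (l : List α) (d : α) (n j : Int) (hn : 0 < n)
    (hlen : l.length = n.toNat) (hlo : -n ≤ j) (hhi : j < n) :
    PySem.List.pyGetD l j d = l[(PySem.Int.mod j n).toNat]'(by
      have := PySem.Int.mod_lt j hn; have := PySem.Int.mod_nonneg j hn; omega) := by
  have hmval : PySem.Int.mod j n = if 0 ≤ j then j else n + j := by
    rw [PySem.Int.mod_eq_emod_of_pos hn]
    by_cases h0 : 0 ≤ j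
    · rw [if_pos h0]; exact Int.emod_eq_of_lt h0 hhi
    · rw [if_neg h0]
      have : (n + j) % n = n + j := Int.emod_eq_of_lt (by omega) (by omega)
      have h2 := Int.add_emod_left n j
      omega
  by_cases h0 : 0 ≤ j
  · rw [PySem.List.pyGetD_eq_getElem _ _ h0 (by omega)]
    congr 1
    rw [hmval, if_pos h0]
  · have hk : j = -((((-j).toNat : Nat)) : Int) := by omega
    conv_lhs => rw [hk]
    rw [PySem.List.pyGetD_neg_natCast _ _ _ (by omega) (by omega)]
    have hie : l.length - (-j).toNat = (PySem.Int.mod j n).toNat := by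
      rw [hmval, if_neg h0]; omega
    simp only [hie]

-- index_list[j] for 0 ≤ j ≤ n: part_len*j in the mapped range part, total at the final slot.
theorem pv_idx_get (pl total n : Int) (hn : 0 < n) (j : Nat) (hj : (j : Int) ≤ n) :
    PySem.List.pyGetD ((PySem.List.pyRange 0 n 1).map (fun i => pl * i) ++ [total]) (j : Int) 0
      = if (j : Int) = n then total else pl * j := by
  have hlen : ((PySem.List.pyRange 0 n 1).map (fun i => pl * i)).length = n.toNat := by
    simp [PySem.List.length_pyRange_one]
  by_cases hj' : (j : Int) = n
  · have hjn : j = n.toNat := by omega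
    subst hjn
    rw [if_pos hj', PySem.List.pyGetD_eq_getElem _ _ (by positivity) (by simp [hlen])]
    rw [List.getElem_append_right (by simp [hlen])]
    simp [hlen]
  · have hjlt : j < n.toNat := by omega
    rw [if_neg hj', PySem.List.pyGetD_eq_getElem _ _ (by positivity) (by simp; omega)]
    rw [List.getElem_append_left (by omega), List.getElem_map, PySem.List.getElem_pyRange_one]
    simp

theorem get_interval_pair_spec : Claim_equal_get_interval_pair := by
  intro prompt part_id part_num _ ⟨hn, hlo, hhi⟩
  unfold Spec_get_interval_pair get_interval_pair get_interval_pair_alt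
  simp only [PySem.List.foldl_append_singleton_eq_map, List.nil_append]
  set total : Int := (prompt.length : Int) with htot
  set pl : Int := PySem.Int.floordiv total part_num with hpl
  set idx : List Int := (PySem.List.pyRange 0 part_num 1).map (fun i => pl * i) ++ [total] with hidx
  set f : Int → Int × Int := fun i =>
    (PySem.List.pyGetD idx i (0 : Int), PySem.List.pyGetD idx (i + 1) (0 : Int)) with hf
  have hm0 : 0 ≤ PySem.Int.mod part_id part_num := PySem.Int.mod_nonneg _ hn
  have hmlt : PySem.Int.mod part_id part_num < part_num := PySem.Int.mod_lt _ hn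
  set m : Int := PySem.Int.mod part_id part_num with hmdef
  -- B's index i equals m
  have hB : PySem.List.pyGetD (PySem.List.pyRange 0 part_num 1) part_id 0 = m := by
    rw [pv_pyGetD_wrap _ _ part_num _ hn (by simp [PySem.List.length_pyRange_one]) hlo hhi,
        PySem.List.getElem_pyRange_one]
    omega
  -- A's lookup in split_list equals f m
  have hA : PySem.List.pyGetD ((PySem.List.pyRange 0 part_num 1).map f) part_id ((0:Int),(0:Int)) = f m := by
    rw [pv_pyGetD_wrap _ _ part_num _ hn
          (by simp [PySem.List.length_pyRange_one]) hlo hhi,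
        List.getElem_map, PySem.List.getElem_pyRange_one]
    congr 1
    omega
  rw [hA, hB, hf]
  have hmnat : m = ((m.toNat : Nat) : Int) := by omega
  have h1 : PySem.List.pyGetD idx m 0 = pl * m := by
    rw [hmnat, hidx, pv_idx_get _ _ _ hn _ (by omega), if_neg (by omega)]
  have h2 : PySem.List.pyGetD idx (m + 1) 0
      = if m = part_num - 1 then total else pl * (m + 1) := by
    have : m + 1 = (((m.toNat + 1 : Nat)) : Int) := by omega
    rw [this, hidx, pv_idx_get _ _ _ hn _ (by omega)]
    by_cases he : m = part_num - 1
    · rw [if_pos (by omega), if_pos he]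
    · rw [if_neg (by omega), if_neg he]
  have hfb : (fun i => (PySem.List.pyGetD idx i 0, PySem.List.pyGetD idx (i + 1) 0)) m
      = (PySem.List.pyGetD idx m 0, PySem.List.pyGetD idx (m + 1) 0) := rfl
  rw [hfb, h1, h2]
  by_cases he : m = part_num - 1
  · rw [if_pos he, if_pos he]
  · rw [if_neg he, if_neg he]
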